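-- pv_equiv track=rewrite | github.com/Ron-Chang/MyNotebook | Coding/Python/Ron/Trials_and_Materials/arion_interview.py | yoo
-- ===== SOURCE A (Python) =====
-- def yoo(m):
--
--     result = 0
--     for i in range(1,m+1):
--         if i%2 == 1:
--             result += i
--         else:
--             result -= i
--     return result
-- ===== SOURCE B (Python) =====
-- def yoo(m):
--     # closed form: 1-2+3-... = (m+1)//2 for odd m, -m//2 for even m; 0 when m < 1
--     if m < 1:
--         return 0
--     return (m + 1) // 2 if m % 2 == 1 else -(m // 2)
-- ===== Notes on version B (the rewrite author's own statement) =====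
-- stated objective: faster
-- what changed: replaced the O(m) accumulation loop with an O(1) closed-form parity formula
import Mathlib
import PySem

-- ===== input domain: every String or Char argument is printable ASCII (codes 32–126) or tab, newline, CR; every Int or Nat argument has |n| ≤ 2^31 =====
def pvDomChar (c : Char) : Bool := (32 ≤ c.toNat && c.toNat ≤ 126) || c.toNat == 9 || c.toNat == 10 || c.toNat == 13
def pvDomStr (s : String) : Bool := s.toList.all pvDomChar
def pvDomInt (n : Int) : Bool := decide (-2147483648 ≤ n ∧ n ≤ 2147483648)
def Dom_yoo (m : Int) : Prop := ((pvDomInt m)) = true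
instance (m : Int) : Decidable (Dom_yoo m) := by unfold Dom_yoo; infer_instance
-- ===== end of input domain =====

-- B replaces A's O(m) alternating-sum loop with an O(1) closed-form parity formula.


-- ===== PORT A =====
def yoo (m : Int) : Int :=
  (PySem.List.pyRange 1 (m + 1) 1).foldl
    (fun result i => if PySem.Int.mod i 2 == 1 then result + i else result - i) 0

-- ===== PORT B =====
def yoo_alt (m : Int) : Int :=
  if m < 1 then 0
  else if PySem.Int.mod m 2 == 1 then PySem.Int.floordiv (m + 1) 2
  else -(PySem.Int.floordiv m 2)

-- ===== PRECONDITION & SPEC =====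
def Spec_yoo (m : Int) (out : Int) : Prop := out = yoo_alt m
instance (m : Int) (out : Int) : Decidable (Spec_yoo m out) := by unfold Spec_yoo; infer_instance

-- ===== CLAIM (what is proved, stated in full; the proofs are below) =====
def Claim_equal_yoo : Prop := ∀ (m : Int), Dom_yoo m → Spec_yoo m (yoo m)

-- ===== LEMMAS AND PROOFS =====

theorem yoo_eq_alt_nat (n : Nat) : yoo (n : Int) = yoo_alt (n : Int) := by
  induction n with
  | zero =>
    unfold yoo yoo_alt
    rw [PySem.List.pyRange_one_eq_nil (by omega)]
    decide
  | succ k ih =>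
    unfold yoo yoo_alt
    unfold yoo yoo_alt at ih
    push_cast
    rw [show (k:Int) + 1 + 1 = ((k:Int) + 1) + 1 from rfl,
        PySem.List.pyRange_one_succ_right (by omega), List.foldl_append, ih]
    simp only [List.foldl_cons, List.foldl_nil]
    have hm2 : PySem.Int.mod ((k:Int) + 1) 2 = ((k:Int) + 1) % 2 :=
      PySem.Int.mod_eq_emod_of_pos (by omega)
    have hn2 : PySem.Int.mod (k:Int) 2 = (k:Int) % 2 :=
      PySem.Int.mod_eq_emod_of_pos (by omega)
    have hd1 : PySem.Int.floordiv ((k:Int) + 1 + 1) 2 = ((k:Int) + 1 + 1) / 2 :=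
      PySem.Int.floordiv_eq_ediv_of_pos (by omega)
    have hd2 : PySem.Int.floordiv ((k:Int) + 1) 2 = ((k:Int) + 1) / 2 :=
      PySem.Int.floordiv_eq_ediv_of_pos (by omega)
    have hd3 : PySem.Int.floordiv (k:Int) 2 = (k:Int) / 2 :=
      PySem.Int.floordiv_eq_ediv_of_pos (by omega)
    simp only [hm2, hn2, hd1, hd2, hd3, beq_iff_eq]
    split_ifs <;> omega

theorem yoo_eq_alt (m : Int) : yoo m = yoo_alt m := by
  rcases (by omega : m < 0 ∨ 0 ≤ m) with h | h
  · unfold yoo yoo_alt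
    rw [PySem.List.pyRange_one_eq_nil (by omega)]
    simp
    omega
  · obtain ⟨n, rfl⟩ : ∃ n : Nat, m = (n : Int) := ⟨m.toNat, by omega⟩
    exact yoo_eq_alt_nat n

-- ===== VERDICT (by name: the statement is the Claim_ definition above) =====
theorem yoo_spec : Claim_equal_yoo := by
  intro m _
  exact yoo_eq_alt m
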